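-- pv_equiv track=rewrite | github.com/PerrottaJulian/paradigmas-2023 | integradora_A/giA-2.py | diaSemana
-- ===== SOURCE A (Python) =====
-- dias_semana = ["lunes", "martes", "miercoles", "jueves", "viernes", "sabado", "domingo"]
--
-- def diaSemana (dia):
--     temp = 0
--     for i in range (dia):
--         try:
--             dia_de_la_semana = dias_semana[temp]
--         except:
--             temp = 0
--             dia_de_la_semana = dias_semana[temp]
--         temp +=1
--     return dia_de_la_semana
-- ===== SOURCE B (Python) =====
-- dias_semana = ["lunes", "martes", "miercoles", "jueves", "viernes", "sabado", "domingo"]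
--
-- def diaSemana(dia):
--     return dias_semana[(dia - 1) % 7]
-- ===== Notes on version B (the rewrite author's own statement) =====
-- stated objective: faster
-- what changed: Replaces the O(dia) cycling loop by a direct O(1) modular index dias_semana[(dia-1)%7].
-- crash fix: For dia <= 0 A's loop body never runs and A raises UnboundLocalError; B returns dias_semana[(dia-1)%7] (e.g. 'domingo' at dia=0). — e.g. on diaSemana(0): A raises UnboundLocalError, B returns "domingo"
import Mathlib
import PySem

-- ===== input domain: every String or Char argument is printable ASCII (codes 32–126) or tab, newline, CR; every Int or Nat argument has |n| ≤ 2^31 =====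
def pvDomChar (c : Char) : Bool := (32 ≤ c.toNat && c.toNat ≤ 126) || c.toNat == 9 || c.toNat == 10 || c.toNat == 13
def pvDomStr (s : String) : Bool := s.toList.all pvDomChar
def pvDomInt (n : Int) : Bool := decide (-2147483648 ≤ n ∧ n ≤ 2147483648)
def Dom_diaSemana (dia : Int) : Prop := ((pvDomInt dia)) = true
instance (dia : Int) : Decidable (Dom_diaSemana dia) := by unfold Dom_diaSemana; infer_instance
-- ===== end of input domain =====

-- B replaces A's O(dia) cycling loop by the O(1) modular index dias_semana[(dia-1)%7] (objective: faster).

-- ===== PORT A =====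
def diasList : List String := ["lunes", "martes", "miercoles", "jueves", "viernes", "sabado", "domingo"]

-- one iteration of A's loop body: try dias_semana[temp] except temp=0; dias_semana[0]; then temp += 1
def diaStep (st : Int × Option String) : Int × Option String :=
  match PySem.List.pyGet? diasList st.1 with
  | some s => (st.1 + 1, some s)
  | none => ((0:Int) + 1, PySem.List.pyGet? diasList 0)

def diaSemana (dia : Int) : String :=
  let r := (PySem.List.pyRange 0 dia 1).foldl (fun st _ => diaStep st) ((0:Int), (none : Option String))
  -- r.2 = none means the variable was never assigned (UnboundLocalError); excluded by Pre_
  (r.2).getD ""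

-- ===== PORT B =====
def diaSemana_alt (dia : Int) : String :=
  (PySem.List.pyGet? diasList (PySem.Int.mod (dia - 1) 7)).getD ""

-- ===== PRECONDITION & SPEC =====
-- Pre_ excludes dia <= 0, where A's loop body never runs and A raises UnboundLocalError.
def Pre_diaSemana (dia : Int) : Prop := 1 ≤ dia
instance (dia : Int) : Decidable (Pre_diaSemana dia) := by unfold Pre_diaSemana; infer_instance
def pvWitness_diaSemana : Int := 3

-- For dia <= 0 A raises UnboundLocalError; B returns dias_semana[(dia-1)%7].
def Raises_diaSemana (dia : Int) : Prop := dia ≤ 0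
instance (dia : Int) : Decidable (Raises_diaSemana dia) := by unfold Raises_diaSemana; infer_instance
def pvRaiseWitness_diaSemana : Int := 0
def pvRaiseWitnessOut_diaSemana : String := "domingo"

def Spec_diaSemana (dia : Int) (out : String) : Prop := out = diaSemana_alt dia
instance (dia : Int) (out : String) : Decidable (Spec_diaSemana dia out) := by unfold Spec_diaSemana; infer_instance

-- ===== CLAIM (what is proved, stated in full; the proofs are below) =====
def Claim_equal_diaSemana : Prop := ∀ (dia : Int), Dom_diaSemana dia → Pre_diaSemana dia → Spec_diaSemana dia (diaSemana dia)
def Claim_raises_diaSemana : Prop := (∀ (dia : Int), Dom_diaSemana dia → Raises_diaSemana dia → ¬ Pre_diaSemana dia) ∧ (Dom_diaSemana (pvRaiseWitness_diaSemana) ∧ Raises_diaSemana (pvRaiseWitness_diaSemana) ∧ diaSemana_alt (pvRaiseWitness_diaSemana) = pvRaiseWitnessOut_diaSemana)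

-- ===== LEMMAS AND PROOFS =====
theorem foldl_diaStep (l : List Int) (s : Int × Option String) :
    l.foldl (fun st _ => diaStep st) s = diaStep^[l.length] s := by
  induction l generalizing s with
  | nil => rfl
  | cons x xs ih => simp [List.foldl, Function.iterate_succ_apply, ih]

theorem iter_diaStep (k : Nat) :
    diaStep^[k + 1] ((0:Int), (none : Option String))
      = (((k % 7 : Nat) : Int) + 1, some (diasList.getD (k % 7) "")) := by
  induction k with
  | zero => decide
  | succ k ih =>
    rw [Function.iterate_succ_apply', ih]
    obtain ⟨r, hr, hkr⟩ : ∃ r, r < 7 ∧ k % 7 = r := ⟨k % 7, Nat.mod_lt _ (by norm_num), rfl⟩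
    have hk1 : (k + 1) % 7 = (r + 1) % 7 := by omega
    rw [hkr, hk1]
    interval_cases r <;> decide

theorem diaSemana_spec : Claim_equal_diaSemana := by
  intro dia _ hpre
  unfold Spec_diaSemana diaSemana diaSemana_alt Pre_diaSemana at *
  rw [foldl_diaStep, PySem.List.length_pyRange_one]
  have h1 : (dia - 0).toNat = (dia.toNat - 1) + 1 := by omega
  rw [h1, iter_diaStep]
  rw [PySem.Int.mod_eq_emod_of_pos (by norm_num)]
  have h2 : (dia - 1) % 7 = (((dia.toNat - 1) % 7 : Nat) : Int) := by omega
  rw [h2]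
  obtain ⟨r, hr, hkr⟩ : ∃ r, r < 7 ∧ (dia.toNat - 1) % 7 = r :=
    ⟨(dia.toNat - 1) % 7, Nat.mod_lt _ (by norm_num), rfl⟩
  rw [hkr]
  interval_cases r <;> decide

-- ===== VERDICT (by name: the statement is the Claim_ definition above) =====
@[simp] theorem diaSemana_raises : Claim_raises_diaSemana := by
  unfold Claim_raises_diaSemana
  exact ⟨fun dia _ h hp => by unfold Raises_diaSemana Pre_diaSemana at *; omega, by decide⟩
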